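-- pv_equiv track=rewrite | github.com/ABPande/MyPythonRepo | Python/Basics/py_R2/functions.py | find007
-- ===== SOURCE A (Python) =====
-- def find007(list69):
-- 	search0 = False
-- 	search7 = False
-- 	found007 = False
-- 	for i in list69:
-- 		if i == 7 and search7:
-- 			return True
-- 		elif i == 0 and search0:
-- 			search7 = True
-- 			search0 = False
-- 		elif i == 0:
-- 			search0 = True
-- 	return	False
-- ===== SOURCE B (Python) =====
-- def find007(list69):
--     zeros = 0
--     for idx, x in enumerate(list69):
--         if x == 0:
--             zeros += 1
--             if zeros == 2:
--                 return 7 in list69[idx + 1:]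
--     return False
-- ===== Notes on version B (the rewrite author's own statement) =====
-- stated objective: simpler
-- what changed: Replaces the two-boolean state machine with a landmark decomposition: count zeros to find the index of the second 0, then answer by a membership test on the suffix after it.
import Mathlib
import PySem

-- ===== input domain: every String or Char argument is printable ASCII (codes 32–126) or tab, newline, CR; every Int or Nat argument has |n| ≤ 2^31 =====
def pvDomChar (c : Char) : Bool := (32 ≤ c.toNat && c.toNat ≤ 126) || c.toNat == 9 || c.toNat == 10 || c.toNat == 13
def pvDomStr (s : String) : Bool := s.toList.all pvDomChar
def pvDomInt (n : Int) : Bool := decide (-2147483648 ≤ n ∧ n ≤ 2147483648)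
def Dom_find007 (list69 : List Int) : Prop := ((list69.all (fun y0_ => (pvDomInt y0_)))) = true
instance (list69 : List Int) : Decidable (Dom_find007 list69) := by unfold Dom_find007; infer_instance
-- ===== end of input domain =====

-- B replaces A's two-boolean state machine with a "find the second 0, then scan the suffix for 7" decomposition (same cost, simpler).


-- ===== PORT A =====
def find007Loop : List Int → Bool → Bool → Bool
  | [], _, _ => false
  | i :: rest, search0, search7 =>
    if i == 7 && search7 then true
    else if i == 0 && search0 then find007Loop rest false true
    else if i == 0 then find007Loop rest true search7
    else find007Loop rest search0 search7

def find007 (list69 : List Int) : Bool := find007Loop list69 false false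

-- ===== PORT B =====
def find007AltLoop (list69 : List Int) : List (Int × Int) → Int → Bool
  | [], _ => false
  | (idx, x) :: rest, zeros =>
    if x == 0 then
      if zeros + 1 == 2 then (PySem.List.slice list69 (some (idx + 1)) none).contains 7
      else find007AltLoop list69 rest (zeros + 1)
    else find007AltLoop list69 rest zeros

def find007_alt (list69 : List Int) : Bool :=
  find007AltLoop list69 (PySem.List.enumerate list69 0) 0

-- ===== PRECONDITION & SPEC =====
def Spec_find007 (list69 : List Int) (out : Bool) : Prop := out = find007_alt list69
instance (list69 : List Int) (out : Bool) : Decidable (Spec_find007 list69 out) := by unfold Spec_find007; infer_instance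

-- ===== CLAIM (what is proved, stated in full; the proofs are below) =====
def Claim_equal_find007 : Prop := ∀ (list69 : List Int), Dom_find007 list69 → Spec_find007 list69 (find007 list69)

-- ===== LEMMAS AND PROOFS =====

-- once search7 is set, A returns true iff some 7 remains
lemma find007Loop_search7 (l : List Int) : ∀ s0 : Bool, find007Loop l s0 true = l.contains 7 := by
  induction l with
  | nil => intro s0; simp [find007Loop]
  | cons i rest ih =>
    intro s0
    by_cases h7 : i = 7
    · simp [find007Loop, h7]
    · by_cases h0 : i = 0
      · simp [find007Loop, h0, ih]
      · simp [find007Loop, h0, h7, Ne.symm h7, ih s0]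

lemma find007_main (l₀ : List Int) :
    ∀ (t : List Int) (k : Nat), l₀.drop k = t → ∀ (s0 : Bool),
      find007AltLoop l₀ (PySem.List.enumerate t (k : Int)) (if s0 then 1 else 0)
        = find007Loop t s0 false := by
  intro t
  induction t with
  | nil => intro k _ s0; simp [PySem.List.enumerate_nil, find007AltLoop, find007Loop]
  | cons x rest ih =>
    intro k hk s0
    have hrest : l₀.drop (k + 1) = rest := by
      have := congrArg List.tail hk
      simpa [List.tail_drop] using this
    rw [PySem.List.enumerate_cons]
    by_cases h0 : x = 0
    · cases s0 with
      | true =>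
        -- second zero found: suffix membership = A's search7 phase
        have hslice : PySem.List.slice l₀ (some ((k : Int) + 1)) none = rest := by
          have : ((k : Int) + 1) = ((k + 1 : Nat) : Int) := by push_cast; ring
          rw [this, PySem.List.slice_from_natCast]
          exact hrest
        simp [find007AltLoop, find007Loop, h0, hslice, find007Loop_search7]
      | false =>
        subst h0
        have hih := ih (k + 1) hrest true
        simp only [if_pos trivial, Nat.cast_add, Nat.cast_one] at hih
        simp [find007AltLoop, find007Loop, hih]
    · have h7 : ¬ (x == 7 && false) = true := by simp
      have hcast : ((k : Int) + 1) = ((k + 1 : Nat) : Int) := by push_cast; ring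
      have := ih (k + 1) hrest s0
      simp only [find007AltLoop, find007Loop]
      simp only [beq_iff_eq, h0, if_false, Bool.and_false]
      rw [hcast]
      simpa [h0] using this

-- ===== VERDICT (by name: the statement is the Claim_ definition above) =====
theorem find007_spec : Claim_equal_find007 := by
  intro l _
  unfold Spec_find007 find007 find007_alt
  have := find007_main l l 0 (by simp) false
  simpa using this.symm
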